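-- pv_equiv track=rewrite | github.com/Bobcatsoap/jy-server | cell/RoomType6InitiativeCardSplit.py | find_dui_zi
-- ===== SOURCE A (Python) =====
-- def find_dui_zi(cards):
--     dui_zi = []
--     checked = []
--     for c in cards:
--         if cards.count(c) == 2 and c not in checked:
--             dui_zi.append([c, c])
--             checked.append(c)
--
--     return dui_zi
-- ===== SOURCE B (Python) =====
-- def find_dui_zi(cards):
--     counts = {}
--     for c in cards:
--         counts[c] = counts.get(c, 0) + 1
--     return [[c, c] for c, n in counts.items() if n == 2]
-- ===== Notes on version B (the rewrite author's own statement) =====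
-- stated objective: faster
-- what changed: Replaces the per-element cards.count rescans plus a 'checked' dedup list with one frequency-table pass over cards followed by a pass over the table's distinct keys (insertion order preserves first-appearance order).
import Mathlib
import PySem

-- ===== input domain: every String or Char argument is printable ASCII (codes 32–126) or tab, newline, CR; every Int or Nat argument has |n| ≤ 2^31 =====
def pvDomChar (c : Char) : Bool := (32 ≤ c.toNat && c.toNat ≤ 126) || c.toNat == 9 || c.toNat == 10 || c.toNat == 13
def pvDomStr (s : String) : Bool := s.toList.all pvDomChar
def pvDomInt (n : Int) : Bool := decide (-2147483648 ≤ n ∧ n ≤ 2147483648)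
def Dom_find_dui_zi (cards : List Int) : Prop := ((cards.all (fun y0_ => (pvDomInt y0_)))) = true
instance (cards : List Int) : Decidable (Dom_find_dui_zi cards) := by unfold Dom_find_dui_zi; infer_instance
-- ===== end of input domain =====

-- B replaces A's quadratic count-and-rescan with a single counting pass and a pass over distinct keys.


-- ===== PORT A =====
-- state: (dui_zi, checked); each element rescans cards via count and checks the dedup list
def find_dui_zi (cards : List Int) : List (List Int) :=
  (cards.foldl
    (fun (st : List (List Int) × List Int) c =>
      if PySem.List.count cards c == 2 && !(st.2.contains c) then
        (st.1 ++ [[c, c]], st.2 ++ [c])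
      else st)
    ([], [])).1

-- ===== PORT B =====
-- build a frequency table in one pass, then emit [c, c] for each distinct key with count 2
def find_dui_zi_alt (cards : List Int) : List (List Int) :=
  let counts : PySem.Dict Int Int :=
    cards.foldl (fun d c => d.insert c (d.getD c 0 + 1)) PySem.Dict.empty
  (counts.items.filter (fun p => p.2 == 2)).map (fun p => [p.1, p.1])

-- ===== PRECONDITION & SPEC =====
def Spec_find_dui_zi (cards : List Int) (out : List (List Int)) : Prop := out = find_dui_zi_alt cards
instance (cards : List Int) (out : List (List Int)) : Decidable (Spec_find_dui_zi cards out) := by unfold Spec_find_dui_zi; infer_instance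

-- ===== CLAIM (what is proved, stated in full; the proofs are below) =====
def Claim_equal_find_dui_zi : Prop := ∀ (cards : List Int), Dom_find_dui_zi cards → Spec_find_dui_zi cards (find_dui_zi cards)

-- ===== LEMMAS AND PROOFS =====

-- the fresh elements appended by folding Set.add over l starting from seen-set s
def pvNewElems (l s : List Int) : List Int :=
  match l with
  | [] => []
  | c :: l => if c ∈ s then pvNewElems l s else c :: pvNewElems l (s ++ [c])

theorem pv_foldl_add (l : List Int) : ∀ s : List Int,
    l.foldl PySem.Set.add s = s ++ pvNewElems l s := by
  induction l with
  | nil => intro s; simp [pvNewElems]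
  | cons c l ih =>
    intro s
    by_cases h : c ∈ s
    · simp [pvNewElems, h, List.foldl_cons, ih]
    · simp [pvNewElems, h, List.foldl_cons, ih]

theorem pv_foldA (cards : List Int) (l : List Int) : ∀ (dz : List (List Int)) (ch s : List Int),
    (∀ c : Int, cards.count c = 2 → (c ∈ ch ↔ c ∈ s)) →
    (l.foldl
      (fun (st : List (List Int) × List Int) c =>
        if PySem.List.count cards c == 2 && !(st.2.contains c) then
          (st.1 ++ [[c, c]], st.2 ++ [c])
        else st)
      (dz, ch)).1
    = dz ++ ((pvNewElems l s).filter (fun c => PySem.List.count cards c == 2)).map (fun c => [c, c]) := by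
  induction l with
  | nil => intro dz ch s _; simp [pvNewElems]
  | cons c l ih =>
    intro dz ch s hmem
    by_cases h2 : cards.count c = 2
    · by_cases hch : c ∈ ch
      · have hs : c ∈ s := (hmem c h2).mp hch
        simp only [pvNewElems, if_pos hs, List.foldl_cons]
        rw [if_neg (by simp [hch])]
        exact ih dz ch s hmem
      · have hs : c ∉ s := fun hs => hch ((hmem c h2).mpr hs)
        simp only [pvNewElems, if_neg hs, List.foldl_cons]
        rw [if_pos (by simp [hch, PySem.List.count_eq, h2])]
        rw [ih (dz ++ [[c, c]]) (ch ++ [c]) (s ++ [c])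
          (by intro d hd; simp [hmem d hd])]
        simp [PySem.List.count_eq, h2]
    · by_cases hs : c ∈ s
      · simp only [pvNewElems, if_pos hs, List.foldl_cons]
        rw [if_neg (by simp [PySem.List.count_eq, h2])]
        exact ih dz ch s hmem
      · simp only [pvNewElems, if_neg hs, List.foldl_cons]
        rw [if_neg (by simp [PySem.List.count_eq, h2])]
        rw [ih dz ch (s ++ [c]) (by
          intro d hd
          have : d ≠ c := fun h => h2 (h ▸ hd)
          simp [hmem d hd, this])]
        simp [PySem.List.count_eq, h2]

-- ===== VERDICT (by name: the statement is the Claim_ definition above) =====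
theorem find_dui_zi_spec : Claim_equal_find_dui_zi := by
  intro cards _
  show find_dui_zi cards = find_dui_zi_alt cards
  unfold find_dui_zi find_dui_zi_alt
  rw [pv_foldA cards cards [] [] [] (by simp)]
  rw [PySem.Dict.foldl_insert_getD_add_one_eq_counter]
  simp only [PySem.Dict.items_counter, PySem.Set.ofList_eq_foldl]
  rw [pv_foldl_add, List.filter_map, List.map_map]
  simp only [Function.comp_def, PySem.List.count_eq, List.nil_append]
  congr 1
  apply List.filter_congr
  intro x _
  rcases eq_or_ne (List.count x cards) 2 with h | h
  · simp [h]
  · simp [h]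
    exact_mod_cast h
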